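-- pv_equiv track=rewrite | github.com/pratham124/311-forecast-system | backend/app/services/forecast_visualization_service.py | normalize_service_categories
-- ===== SOURCE A (Python) =====
-- def normalize_service_categories(service_categories: list[str] | None) -> list[str]:
--     if not service_categories:
--         return []
--     seen: dict[str, None] = {}
--     for category in service_categories:
--         token = category.strip()
--         if token:
--             seen[token] = None
--     return sorted(seen.keys())
-- ===== SOURCE B (Python) =====
-- def normalize_service_categories(service_categories):
--     if not service_categories:
--         return []
--     tokens = sorted(t for t in (c.strip() for c in service_categories) if t)
--     result = []
--     for t in tokens:
--         if not result or result[-1] != t: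
--             result.append(t)
--     return result
-- ===== Notes on version B (the rewrite author's own statement) =====
-- stated objective: alternative
-- what changed: Replaces hash-based dict deduplication followed by a sort with filter-strip, sort first, then a single pass removing adjacent duplicates from the sorted list.
import Mathlib
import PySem

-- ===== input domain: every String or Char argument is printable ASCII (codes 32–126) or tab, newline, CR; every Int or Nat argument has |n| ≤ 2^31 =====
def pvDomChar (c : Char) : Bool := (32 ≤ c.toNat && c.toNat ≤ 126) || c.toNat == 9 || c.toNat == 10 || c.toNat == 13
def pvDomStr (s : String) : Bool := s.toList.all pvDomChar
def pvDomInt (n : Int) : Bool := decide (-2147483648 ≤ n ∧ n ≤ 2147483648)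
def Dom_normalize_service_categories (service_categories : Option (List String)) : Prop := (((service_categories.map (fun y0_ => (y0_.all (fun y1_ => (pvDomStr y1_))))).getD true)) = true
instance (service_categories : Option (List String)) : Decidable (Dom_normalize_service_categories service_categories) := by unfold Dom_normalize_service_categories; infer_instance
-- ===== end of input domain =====

-- B replaces dict-based dedup-then-sort by strip/filter, sort, then one adjacent-duplicate-removal pass (alternative decomposition, same cost).

-- ===== PORT A =====
def normalize_service_categories (service_categories : Option (List String)) : List String :=
  match service_categories with
  | none => []
  | some cats =>
    if cats = [] then []
    else
      let seen : PySem.Dict String (Option Unit) :=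
        cats.foldl (fun d category =>
          let token := PySem.Str.strip category
          if token ≠ "" then d.insert token none else d) PySem.Dict.empty
      PySem.List.sorted seen.keys (fun x => x) false

-- ===== PORT B =====
def normalize_service_categories_alt (service_categories : Option (List String)) : List String :=
  match service_categories with
  | none => []
  | some cats =>
    if cats = [] then []
    else
      let tokens := PySem.List.sorted ((cats.map PySem.Str.strip).filter (fun t => t ≠ "")) (fun x => x) false
      -- 'not result or result[-1] != t' is exactly 'result.getLast? ≠ some t'
      tokens.foldl (fun res t => if res.getLast? ≠ some t then res ++ [t] else res) []

-- ===== PRECONDITION & SPEC =====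
def Spec_normalize_service_categories (service_categories : Option (List String)) (out : List String) : Prop := out = normalize_service_categories_alt service_categories
instance (service_categories : Option (List String)) (out : List String) : Decidable (Spec_normalize_service_categories service_categories out) := by unfold Spec_normalize_service_categories; infer_instance

-- ===== CLAIM (what is proved, stated in full; the proofs are below) =====
def Claim_equal_normalize_service_categories : Prop := ∀ (service_categories : Option (List String)), Dom_normalize_service_categories service_categories → Spec_normalize_service_categories service_categories (normalize_service_categories service_categories)

-- ===== LEMMAS AND PROOFS =====

-- proof-only names for the two fold bodies (definitionally the ports' lambdas)
def pvStepA (d : PySem.Dict String (Option Unit)) (category : String) : PySem.Dict String (Option Unit) :=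
  let token := PySem.Str.strip category
  if token ≠ "" then d.insert token none else d

def pvStepB (res : List String) (t : String) : List String :=
  if res.getLast? ≠ some t then res ++ [t] else res

-- A's dict loop: the keys are exactly the nonempty stripped tokens
theorem pv_mem_keys_fold (cats : List String) (d : PySem.Dict String (Option Unit)) (x : String) :
    x ∈ (cats.foldl pvStepA d).keys ↔
      x ∈ d.keys ∨ x ∈ (cats.map PySem.Str.strip).filter (fun t => t ≠ "") := by
  induction cats generalizing d with
  | nil => simp
  | cons c rest ih =>
    rw [List.foldl_cons]
    by_cases h : PySem.Str.strip c = ""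
    · have h1 : pvStepA d c = d := by simp [pvStepA, h]
      rw [h1, ih]
      simp [h]
    · have h1 : pvStepA d c = d.insert (PySem.Str.strip c) none := by simp [pvStepA, h]
      rw [h1, ih, PySem.Dict.mem_keys_insert]
      simp only [List.map_cons, List.filter_cons]
      rw [if_pos (by simp [h]), List.mem_cons]
      constructor
      · rintro ((rfl | hk) | hf)
        exacts [Or.inr (Or.inl rfl), Or.inl hk, Or.inr (Or.inr hf)]
      · rintro (hk | (rfl | hf))
        exacts [Or.inl (Or.inr hk), Or.inl (Or.inl rfl), Or.inr hf]

theorem pv_nodup_keys_fold (cats : List String) (d : PySem.Dict String (Option Unit))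
    (hd : d.keys.Nodup) : (cats.foldl pvStepA d).keys.Nodup := by
  induction cats generalizing d with
  | nil => exact hd
  | cons c rest ih =>
    rw [List.foldl_cons]
    by_cases h : PySem.Str.strip c = ""
    · have h1 : pvStepA d c = d := by simp [pvStepA, h]
      rw [h1]; exact ih _ hd
    · have h1 : pvStepA d c = d.insert (PySem.Str.strip c) none := by simp [pvStepA, h]
      rw [h1]
      exact ih _ (PySem.Dict.nodup_keys_insert _ _ _ hd)

-- B's adjacent-dedup fold, rewritten relative to the accumulator's last element
def pvAdj (p : Option String) : List String → List String
  | [] => []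
  | t :: rest => if p ≠ some t then t :: pvAdj (some t) rest else pvAdj p rest

theorem pv_foldl_adj (l : List String) (acc : List String) :
    l.foldl pvStepB acc = acc ++ pvAdj acc.getLast? l := by
  induction l generalizing acc with
  | nil => simp [pvAdj]
  | cons t rest ih =>
    rw [List.foldl_cons]
    by_cases h : acc.getLast? = some t
    · have h1 : pvStepB acc t = acc := by simp [pvStepB, h]
      rw [h1, ih, h]
      simp [pvAdj]
    · have h1 : pvStepB acc t = acc ++ [t] := by simp [pvStepB, h]
      rw [h1, ih, List.getLast?_concat]
      simp [pvAdj, h]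

theorem pv_mem_pvAdj (l : List String) (p : Option String)
    (hs : l.Pairwise (· ≤ ·)) (hp : ∀ a, p = some a → ∀ y ∈ l, a ≤ y) (x : String) :
    x ∈ pvAdj p l ↔ x ∈ l ∧ some x ≠ p := by
  induction l generalizing p with
  | nil => simp [pvAdj]
  | cons t rest ih =>
    have hrest := (List.pairwise_cons.mp hs).2
    have hhead := (List.pairwise_cons.mp hs).1
    by_cases h : p = some t
    · rw [show pvAdj p (t :: rest) = pvAdj p rest by simp [pvAdj, h]]
      rw [ih p hrest (by rintro a ha y hy; rw [h] at ha; injection ha with ha'; subst ha'; exact hhead y hy)]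
      constructor
      · rintro ⟨hm, hne⟩; exact ⟨List.mem_cons_of_mem _ hm, hne⟩
      · rintro ⟨hm, hne⟩
        rcases List.mem_cons.mp hm with rfl | hm
        · exact absurd h.symm hne
        · exact ⟨hm, hne⟩
    · rw [show pvAdj p (t :: rest) = t :: pvAdj (some t) rest by
        simp [pvAdj, h]]
      rw [List.mem_cons, ih (some t) hrest (by rintro a ha y hy; injection ha with ha'; subst ha'; exact hhead y hy)]
      constructor
      · rintro (rfl | ⟨hm, hne⟩)
        · exact ⟨List.mem_cons_self, fun hh => h hh.symm⟩
        · refine ⟨List.mem_cons_of_mem _ hm, ?_⟩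
          rintro hxp
          rcases p with _ | a
          · simp at hxp
          · have hxa : x = a := Option.some.inj hxp
            have hat : a ≤ t := hp a rfl t List.mem_cons_self
            have halt : a < t := lt_of_le_of_ne hat (by rintro rfl; exact h rfl)
            have hx : t ≤ x := hhead x hm
            rw [hxa] at hx
            exact absurd (lt_of_lt_of_le halt hx) (lt_irrefl a)
      · rintro ⟨hm, hne⟩
        rcases List.mem_cons.mp hm with rfl | hm
        · exact Or.inl rfl
        · by_cases hxt : x = t
          · exact Or.inl hxt
          · exact Or.inr ⟨hm, by simpa using hxt⟩

theorem pv_pairwise_pvAdj (l : List String) (p : Option String)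
    (hs : l.Pairwise (· ≤ ·)) : (pvAdj p l).Pairwise (· < ·) := by
  induction l generalizing p with
  | nil => simp [pvAdj]
  | cons t rest ih =>
    have hrest := (List.pairwise_cons.mp hs).2
    have hhead := (List.pairwise_cons.mp hs).1
    by_cases h : p = some t
    · rw [show pvAdj p (t :: rest) = pvAdj p rest by simp [pvAdj, h]]
      exact ih p hrest
    · rw [show pvAdj p (t :: rest) = t :: pvAdj (some t) rest by
        simp [pvAdj, h]]
      refine List.pairwise_cons.mpr ⟨?_, ih (some t) hrest⟩
      intro y hy
      have hmem := (pv_mem_pvAdj rest (some t) hrest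
        (by rintro a ha z hz; injection ha with ha'; subst ha'; exact hhead z hz) y).mp hy
      exact lt_of_le_of_ne (hhead y hmem.1) (fun hh => hmem.2 (by rw [hh]))

-- ===== VERDICT (by name: the statement is the Claim_ definition above) =====
theorem normalize_service_categories_spec : Claim_equal_normalize_service_categories := by
  intro sc _
  unfold Spec_normalize_service_categories normalize_service_categories normalize_service_categories_alt
  match sc with
  | none => rfl
  | some cats =>
    by_cases hc : cats = []
    · simp [hc]
    · simp only [if_neg hc]
      rw [show (fun (d : PySem.Dict String (Option Unit)) category =>
            let token := PySem.Str.strip category;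
            if token ≠ "" then d.insert token none else d) = pvStepA from rfl]
      rw [show (fun (res : List String) t =>
            if res.getLast? ≠ some t then res ++ [t] else res) = pvStepB from rfl]
      set ts := (cats.map PySem.Str.strip).filter (fun t => t ≠ "") with hts
      set ts' := PySem.List.sorted ts (fun x => x) false with hts'
      have hsorted : ts'.Pairwise (· ≤ ·) := PySem.List.sorted_pairwise ts (fun x => x)
      rw [show ts'.foldl pvStepB [] = pvAdj none ts' by simpa using pv_foldl_adj ts' []]
      have hmemB : ∀ x, x ∈ pvAdj none ts' ↔ x ∈ ts := by
        intro x
        rw [pv_mem_pvAdj ts' none hsorted (by simp)]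
        simp [hts', PySem.List.mem_sorted]
      have hpwB : (pvAdj none ts').Pairwise (· < ·) := pv_pairwise_pvAdj ts' none hsorted
      have hndB : (pvAdj none ts').Nodup := hpwB.imp ne_of_lt
      have hmemA : ∀ x, x ∈ (cats.foldl pvStepA PySem.Dict.empty).keys ↔ x ∈ ts := by
        intro x
        rw [pv_mem_keys_fold]
        simp [hts]
      have hndA : (cats.foldl pvStepA PySem.Dict.empty).keys.Nodup :=
        pv_nodup_keys_fold cats _ (by simp [PySem.Dict.empty])
      have hperm : (pvAdj none ts').Perm (cats.foldl pvStepA PySem.Dict.empty).keys :=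
        (List.perm_ext_iff_of_nodup hndB hndA).mpr (fun x => (hmemB x).trans (hmemA x).symm)
      exact PySem.List.sorted_eq_of_perm_of_pairwise_lt _ _ _ hperm hpwB
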